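-- pv_equiv track=rewrite | github.com/Rg9906/scoring | evaluators/redundancy_checker.py | get_repeated_words
-- ===== SOURCE A (Python) =====
-- def get_repeated_words(sentence):
--     """
--     Get a list of words that are repeated in the sentence.
--
--     Args:
--         sentence (str): The sentence to analyze
--
--     Returns:
--         list: List of words that appear more than once
--     """
--     if sentence is None or sentence.strip() == "":
--         return []
--
--     words = sentence.split()
--     word_counts = {}
--     repeated_words = []
--
--     for word in words:
--         word_counts[word] = word_counts.get(word, 0) + 1
--
--     for word, count in word_counts.items():
--         if count > 1:
--             repeated_words.append(word)
--
--     return repeated_words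
-- ===== SOURCE B (Python) =====
-- def get_repeated_words(sentence):
--     if sentence is None or sentence.strip() == "":
--         return []
--     remaining = sentence.split()
--     out = []
--     while remaining:
--         w, rest = remaining[0], remaining[1:]
--         if w in rest:
--             out.append(w)
--         remaining = [x for x in rest if x != w]
--     return out
-- ===== Notes on version B (the rewrite author's own statement) =====
-- stated objective: alternative
-- what changed: Replaces A's frequency-table pass (count dict then items filter) with a successive-filtering worklist loop: take the first remaining word, emit it if it occurs again in the remainder, delete all its copies, repeat until empty.
import Mathlib
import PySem

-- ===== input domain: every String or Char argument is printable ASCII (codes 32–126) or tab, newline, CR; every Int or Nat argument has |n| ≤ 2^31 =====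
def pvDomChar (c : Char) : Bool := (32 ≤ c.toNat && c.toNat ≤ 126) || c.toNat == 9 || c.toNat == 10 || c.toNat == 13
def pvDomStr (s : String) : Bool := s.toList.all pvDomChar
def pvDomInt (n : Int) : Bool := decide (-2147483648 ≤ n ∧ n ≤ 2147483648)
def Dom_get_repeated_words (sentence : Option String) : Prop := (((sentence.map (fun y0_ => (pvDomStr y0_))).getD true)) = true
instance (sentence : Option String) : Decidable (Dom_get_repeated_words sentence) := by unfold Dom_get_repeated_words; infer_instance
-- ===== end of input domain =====

-- B replaces A's frequency-table pass with a successive-filtering worklist loop (objective: alternative).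

-- ===== PORT A =====
def get_repeated_words (sentence : Option String) : List String :=
  match sentence with
  | none => []
  | some s =>
    if PySem.Str.strip s = "" then []
    else
      let words := PySem.Str.split₀ s
      let word_counts := words.foldl (fun d w => d.insert w (d.getD w 0 + 1)) (PySem.Dict.empty : PySem.Dict String Int)
      word_counts.items.foldl (fun acc p => if p.2 > 1 then acc ++ [p.1] else acc) ([] : List String)

-- ===== PORT B =====
-- the while-loop of Source B: pop the first remaining word, emit it if it recurs, delete its copies
def pvScanLoop (remaining : List String) (out : List String) : List String :=
  match remaining with
  | [] => out
  | w :: rest =>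
      pvScanLoop (rest.filter (fun x => x ≠ w)) (if rest.contains w then out ++ [w] else out)
termination_by remaining.length
decreasing_by simpa using Nat.lt_succ_of_le ((List.length_filter_le _ _).trans (by simp))

def get_repeated_words_alt (sentence : Option String) : List String :=
  match sentence with
  | none => []
  | some s =>
    if PySem.Str.strip s = "" then []
    else pvScanLoop (PySem.Str.split₀ s) []

-- ===== PRECONDITION & SPEC =====
def Spec_get_repeated_words (sentence : Option String) (out : List String) : Prop := out = get_repeated_words_alt sentence
instance (sentence : Option String) (out : List String) : Decidable (Spec_get_repeated_words sentence out) := by unfold Spec_get_repeated_words; infer_instance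

-- ===== CLAIM =====
def Claim_equal_get_repeated_words : Prop := ∀ (sentence : Option String), Dom_get_repeated_words sentence → Spec_get_repeated_words sentence (get_repeated_words sentence)

-- ===== LEMMAS AND PROOFS =====

-- unfolding equations of the worklist loop
theorem pvScanLoop_nil (out : List String) : pvScanLoop [] out = out := by
  rw [pvScanLoop]
theorem pvScanLoop_cons (w : String) (rest out : List String) :
    pvScanLoop (w :: rest) out
      = pvScanLoop (rest.filter (fun x => x ≠ w)) (if rest.contains w then out ++ [w] else out) := by
  rw [pvScanLoop]

-- first-occurrence dedup commutes with filter
theorem ofList_filter (p : String → Bool) (xs : List String) :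
    PySem.Set.ofList (xs.filter p) = (PySem.Set.ofList xs).filter p := by
  induction xs with
  | nil => rfl
  | cons x xs ih =>
    by_cases hp : p x = true
    · rw [List.filter_cons_of_pos hp, PySem.Set.ofList_cons, PySem.Set.ofList_cons,
        List.filter_cons_of_pos hp, ih]
      unfold PySem.Set.discard
      rw [List.filter_filter, List.filter_filter]
      congr 1
      apply List.filter_congr
      intro a _
      simp [Bool.and_comm]
    · rw [List.filter_cons_of_neg hp, PySem.Set.ofList_cons, ih,
        List.filter_cons_of_neg hp]
      unfold PySem.Set.discard
      rw [List.filter_filter]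
      apply List.filter_congr
      intro a _
      by_cases hpa : p a = true
      · have hax : a ≠ x := by intro h; subst h; exact hp hpa
        simp [hpa, hax]
      · simp [hpa]

-- invariant of Source B's while loop
theorem pvScanLoop_eq (ws out : List String) :
    pvScanLoop ws out = out ++ (PySem.Set.ofList ws).filter (fun w => decide (List.count w ws > 1)) := by
  induction hn : ws.length using Nat.strong_induction_on generalizing ws out with
  | _ n ih =>
    match ws with
    | [] => simp [pvScanLoop_nil]
    | w :: rest =>
      rw [pvScanLoop_cons]
      have hlt : (rest.filter (fun x => x ≠ w)).length < n := by
        subst hn; simpa using Nat.lt_succ_of_le ((List.length_filter_le _ _).trans (by simp))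
      rw [ih _ hlt _ _ rfl]
      rw [PySem.Set.ofList_cons]
      have hdis : (PySem.Set.ofList rest).discard w
          = (PySem.Set.ofList rest).filter (fun x => decide (x ≠ w)) := by
        unfold PySem.Set.discard
        apply List.filter_congr
        intro a _
        by_cases h : a = w <;> simp [h]
      have hofl := ofList_filter (fun x => decide (x ≠ w)) rest
      have htail : (PySem.Set.ofList (rest.filter (fun x => decide (x ≠ w)))).filter
            (fun v => decide (List.count v (rest.filter (fun x => decide (x ≠ w))) > 1))
          = ((PySem.Set.ofList rest).discard w).filter (fun v => decide (List.count v (w :: rest) > 1)) := by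
        rw [hofl, hdis, List.filter_filter, List.filter_filter]
        apply List.filter_congr
        intro a _
        by_cases haw : a = w
        · simp [haw]
        · have h1 : List.count a (List.filter (fun x => !decide (x = w)) rest) = List.count a rest :=
            List.count_filter (by simp [haw])
          have h2 : List.count a (w :: rest) = List.count a rest := List.count_cons_of_ne (Ne.symm haw)
          simp [h1, h2]
      rw [List.filter_cons]
      by_cases hw : w ∈ rest
      · have hcontains : rest.contains w = true := by simpa using hw
        have hcnt : decide (List.count w (w :: rest) > 1) = true := by
          have h1 : 1 ≤ List.count w rest := List.one_le_count_iff.mpr hw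
          simp only [List.count_cons_self, decide_eq_true_eq]
          omega
        simp only [hcontains, hcnt, if_true, htail]
        simp
      · have hcontains : rest.contains w = false := by simpa using hw
        have hcnt : decide (List.count w (w :: rest) > 1) = false := by
          have h0 : List.count w rest = 0 := List.count_eq_zero.mpr hw
          simp only [List.count_cons_self, decide_eq_false_iff_not]
          omega
        simp only [hcontains, hcnt, Bool.false_eq_true, if_false, htail]

theorem get_repeated_words_eq_alt (sentence : Option String) :
    get_repeated_words sentence = get_repeated_words_alt sentence := by
  unfold get_repeated_words get_repeated_words_alt
  match sentence with
  | none => rfl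
  | some s =>
    dsimp only
    split_ifs with h
    · rfl
    · rw [PySem.Dict.foldl_insert_getD_add_one_eq_counter, PySem.Dict.items_counter]
      rw [show (fun (acc : List String) (p : String × Int) => if p.2 > 1 then acc ++ [p.1] else acc)
          = (fun acc p => if (fun q : String × Int => decide (q.2 > 1)) p = true then acc ++ [Prod.fst p] else acc) from by
        funext acc p; simp]
      rw [PySem.List.foldl_append_if]
      simp only [List.filter_map, List.map_map, List.nil_append, Function.comp_def]
      rw [List.map_id_fun']
      rw [pvScanLoop_eq, List.nil_append]
      apply List.filter_congr
      intro w _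
      simp only [decide_eq_decide]
      omega

-- ===== VERDICT =====
theorem get_repeated_words_spec : Claim_equal_get_repeated_words := by
  intro sentence _
  exact get_repeated_words_eq_alt sentence
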